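-- pv_equiv track=rewrite | github.com/ne-vera/ZIiNIS-6sem | ЛР 12. LSB/lab12/image_lsb.py | modify_pixels
-- ===== SOURCE A (Python) =====
-- def get_byte_list(data):
--     newd = []
--     for i in data:
--         newd.append(format(ord(i), '08b'))
--     return newd
--
-- def modify_pixels(pix, data):
--     datalist = get_byte_list(data)
--     lendata = len(datalist)
--     imdata = iter(pix)
--
--     for i in range(lendata):
--         pix = [value for value in (
--             imdata.__next__()[:3] +
--             imdata.__next__()[:3] +
--             imdata.__next__()[:3]
--         )]
--
--         for j in range(0, 8):
--             if (datalist[i][j] == '0' and pix[j]% 2 != 0):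
--                 pix[j] -= 1
--
--             elif (datalist[i][j] == '1' and pix[j] % 2 == 0):
--                 if(pix[j] != 0):
--                     pix[j] -= 1
--                 else:
--                     pix[j] += 1
--
--         if (i == lendata - 1):
--             if (pix[-1] % 2 == 0):
--                 if(pix[-1] != 0):
--                     pix[-1] -= 1
--                 else:
--                     pix[-1] += 1
--         else:
--             if (pix[-1] % 2 != 0):
--                 pix[-1] -= 1
--         pix = tuple(pix)
--         yield pix[0:3]
--         yield pix[3:6]
--         yield pix[6:9]
-- ===== SOURCE B (Python) =====
-- def _build_bits(data):
--     bits = []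
--     for ch in data:
--         o = ord(ch)
--         for k in range(8):
--             bits.append((o >> (7 - k)) & 1)
--         bits.append(0)
--     if bits:
--         bits[-1] = 1  # terminator marker on the very last bit of the stream
--     return bits
--
-- def _adjust(v, b):
--     return v if v % 2 == b else (1 if b == 1 and v == 0 else v - 1)
--
-- def modify_pixels(pix, data):
--     bits = _build_bits(data)
--     flat = []
--     for i in range(3 * len(data)):
--         flat.extend(pix[i][:3])
--     new = [_adjust(v, b) for v, b in zip(flat, bits)]
--     while len(new) >= 3:
--         yield tuple(new[:3])
--         new = new[3:]
-- ===== Notes on version B (the rewrite author's own statement) =====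
-- stated objective: alternative
-- what changed: B works in staged global passes over flat streams: it builds the whole bitstream at once with shift/mask arithmetic and patches the terminator as bits[-1]=1, flattens the needed pixels' channels by slicing, applies one branch-free adjust over zip(flat,bits), and regroups into triples - replacing A's per-character iterator chunking with string bit patterns, an 8-way branching mutation loop and a special-cased trailing marker branch.
import Mathlib
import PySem

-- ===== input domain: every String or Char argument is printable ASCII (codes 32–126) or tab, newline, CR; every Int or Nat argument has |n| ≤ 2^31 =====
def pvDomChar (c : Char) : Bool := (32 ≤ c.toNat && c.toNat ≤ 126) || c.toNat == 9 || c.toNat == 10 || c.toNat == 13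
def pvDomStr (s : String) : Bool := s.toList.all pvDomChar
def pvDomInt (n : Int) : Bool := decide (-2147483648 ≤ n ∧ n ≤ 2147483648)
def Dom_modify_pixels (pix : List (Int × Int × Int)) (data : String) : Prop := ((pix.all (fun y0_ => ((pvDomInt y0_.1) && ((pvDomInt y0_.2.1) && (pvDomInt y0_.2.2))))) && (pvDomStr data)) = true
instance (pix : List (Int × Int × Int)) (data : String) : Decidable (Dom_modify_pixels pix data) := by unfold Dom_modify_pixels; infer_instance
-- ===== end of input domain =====

-- B replaces A's per-character iterator chunking (string bit patterns, an 8-way branching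
-- mutation loop, a special-cased trailing marker branch) with staged global passes: build the
-- whole bitstream with shift/mask arithmetic and patch bits[-1]=1, flatten the needed channels
-- by slicing, one uniform adjust over zip(flat,bits), regroup into triples. Objective: alternative.

-- ===== PORT A =====
-- format(ord(c), '08b') as a list of '0'/'1' chars (exact on the ASCII domain, codes < 256)
def bits8 (c : Char) : List Char :=
  (List.range 8).map (fun k => if (c.toNat / 2 ^ (7 - k)) % 2 = 1 then '1' else '0')

def get_byte_list (data : String) : List (List Char) :=
  data.toList.foldl (fun acc c => acc ++ [bits8 c]) []

-- one iteration of A's inner 'for j in range(0, 8)' loop (mutation of pix[j] = List.set)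
def stepA (bits : List Char) (p : List Int) (j : Nat) : List Int :=
  let bj := bits.getD j ' '
  let v := p.getD j 0
  if bj = '0' ∧ v % 2 ≠ 0 then p.set j (v - 1)
  else if bj = '1' ∧ v % 2 = 0 then
    (if v ≠ 0 then p.set j (v - 1) else p.set j (v + 1))
  else p

-- A's trailing 'if (i == lendata - 1) … else …' marker branch on pix[-1] (index 8 of the 9-list)
def markerA (isLast : Bool) (p : List Int) : List Int :=
  let v := p.getD 8 0
  if isLast then
    (if v % 2 = 0 then (if v ≠ 0 then p.set 8 (v - 1) else p.set 8 (v + 1)) else p)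
  else
    (if v % 2 ≠ 0 then p.set 8 (v - 1) else p)

-- A's main loop: per character, pull three pixels from the iterator, adjust, yield three tuples.
-- Where the Python iterator runs short A raises (PEP 479 RuntimeError): excluded by Pre_.
def goA (datalist : List (List Char)) (pixrest : List (Int × Int × Int)) :
    List (Int × Int × Int) :=
  match datalist, pixrest with
  | bits :: restd, (a1, a2, a3) :: (b1, b2, b3) :: (c1, c2, c3) :: restp =>
    let p := [a1, a2, a3, b1, b2, b3, c1, c2, c3]
    let p := (List.range 8).foldl (stepA bits) p
    let p := markerA restd.isEmpty p
    (p.getD 0 0, p.getD 1 0, p.getD 2 0) ::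
    (p.getD 3 0, p.getD 4 0, p.getD 5 0) ::
    (p.getD 6 0, p.getD 7 0, p.getD 8 0) :: goA restd restp
  | _, _ => []

def modify_pixels (pix : List (Int × Int × Int)) (data : String) : List (Int × Int × Int) :=
  goA (get_byte_list data) pix

-- ===== PORT B =====
-- (o >> (7 - k)) & 1 for k in range(8)
def char_bits (c : Char) : List Int :=
  (List.range 8).map (fun k => (((c.toNat >>> (7 - k)) &&& 1 : Nat) : Int))

-- _build_bits: whole bitstream (8 bits + 0 per char), then bits[-1] = 1 if nonempty
def build_bits (data : List Char) : List Int :=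
  let bits := data.foldl (fun acc c => acc ++ char_bits c ++ [0]) []
  if bits.isEmpty then bits else bits.set (bits.length - 1) 1

-- _adjust(v, b) = v if v % 2 == b else (1 if b == 1 and v == 0 else v - 1)
def adjust (v b : Int) : Int :=
  if v % 2 = b then v else if b = 1 ∧ v = 0 then 1 else v - 1

-- B's gathering loop: for i in range(3*n): flat.extend(pix[i][:3]); pix[i] raises IndexError
-- when pix runs short (excluded by Pre_; the 'none' case is that raise)
def gather (pix : List (Int × Int × Int)) (n : Nat) : List Int :=
  (List.range n).foldl
    (fun acc (i : Nat) =>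
      acc ++ (match PySem.List.pyGet? pix (Int.ofNat i) with
              | some p => [p.1, p.2.1, p.2.2]
              | none => [])) []

-- the 'while len(new) >= 3: yield tuple(new[:3]); new = new[3:]' regrouping loop
def toTriples : List Int → List (Int × Int × Int)
  | a :: b :: c :: rest => (a, b, c) :: toTriples rest
  | _ => []

def modify_pixels_alt (pix : List (Int × Int × Int)) (data : String) : List (Int × Int × Int) :=
  let bits := build_bits data.toList
  let flat := gather pix (3 * data.toList.length)
  let nw := (flat.zip bits).map (fun vb => adjust vb.1 vb.2)
  toTriples nw

-- ===== PRECONDITION & SPEC =====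
-- A (a generator) raises RuntimeError (PEP 479) when the pixel iterator runs short of
-- 3 pixels per data character; exactly those inputs are excluded.
def Pre_modify_pixels (pix : List (Int × Int × Int)) (data : String) : Prop :=
  3 * data.toList.length ≤ pix.length
instance (pix : List (Int × Int × Int)) (data : String) : Decidable (Pre_modify_pixels pix data) := by
  unfold Pre_modify_pixels; infer_instance

def pvWitness_modify_pixels : (List (Int × Int × Int)) × String :=
  ([(10, 11, 12), (0, 1, 255), (7, 8, 9)], "A")

def Spec_modify_pixels (pix : List (Int × Int × Int)) (data : String) (out : List (Int × Int × Int)) : Prop := out = modify_pixels_alt pix data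
instance (pix : List (Int × Int × Int)) (data : String) (out : List (Int × Int × Int)) : Decidable (Spec_modify_pixels pix data out) := by unfold Spec_modify_pixels; infer_instance

-- ===== CLAIM (what is proved, stated in full; the proofs are below) =====
def Claim_equal_modify_pixels : Prop := ∀ (pix : List (Int × Int × Int)) (data : String), Dom_modify_pixels pix data → Pre_modify_pixels pix data → Spec_modify_pixels pix data (modify_pixels pix data)

-- ===== LEMMAS AND PROOFS =====

-- proof-time characterisation of the gathered channel stream
def flatten3 (ps : List (Int × Int × Int)) : List Int :=
  ps.flatMap (fun p => [p.1, p.2.1, p.2.2])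

lemma gather_eq (pix : List (Int × Int × Int)) (n : Nat) (h : n ≤ pix.length) :
    gather pix n = flatten3 (pix.take n) := by
  induction n with
  | zero => simp [gather, flatten3]
  | succ m ih =>
    have hm : m < pix.length := by omega
    unfold gather
    rw [List.range_succ, List.foldl_append]
    have hg : (List.range m).foldl
        (fun acc (i : Nat) =>
          acc ++ (match PySem.List.pyGet? pix (Int.ofNat i) with
                  | some p => [p.1, p.2.1, p.2.2]
                  | none => [])) [] = flatten3 (pix.take m) := by
      rw [← ih (by omega)]; rfl
    rw [hg]
    have hget : PySem.List.pyGet? pix (Int.ofNat m) = some pix[m] := by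
      simp [PySem.List.pyGet?_natCast, List.getElem?_eq_getElem hm]
    rw [List.foldl_cons, List.foldl_nil, hget]
    rw [show List.take (m + 1) pix = List.take m pix ++ [pix[m]] from by
      rw [List.take_add_one, List.getElem?_eq_getElem hm]; rfl]
    simp only [flatten3, List.flatMap_append, List.flatMap_cons, List.flatMap_nil,
      List.append_nil]

-- proof-time characterisation of the bitstream: per-char 8 bits plus a marker bit
def bitsM : List Char → List Int
  | [] => []
  | c :: rest => char_bits c ++ [if rest.isEmpty then 1 else 0] ++ bitsM rest

lemma char_bits_len (c : Char) : (char_bits c).length = 8 := by simp [char_bits]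

lemma bit_pair (c : Char) (j : Nat) (hj : j < 8) :
    ((bits8 c).getD j ' ' = '0' ∧ (char_bits c).getD j 0 = 0) ∨
    ((bits8 c).getD j ' ' = '1' ∧ (char_bits c).getD j 0 = 1) := by
  interval_cases j <;>
    simp [bits8, char_bits, List.range_succ, Nat.shiftRight_eq_div_pow,
      Nat.and_one_is_mod] <;> omega

lemma stepA_eq (c : Char) (p : List Int) (j : Nat) (hj : j < p.length) (hj8 : j < 8) :
    stepA (bits8 c) p j = p.set j (adjust (p.getD j 0) ((char_bits c).getD j 0)) := by
  rcases bit_pair c j hj8 with ⟨hb, hb'⟩ | ⟨hb, hb'⟩ <;>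
  · simp only [stepA, adjust, hb, hb']
    split_ifs <;> simp_all [List.set_getElem_self] <;> omega

lemma markerA_eq (isLast : Bool) (p : List Int) (h8 : 8 < p.length) :
    markerA isLast p = p.set 8 (adjust (p.getD 8 0) (if isLast then 1 else 0)) := by
  cases isLast <;>
  · simp only [markerA, adjust]
    split_ifs <;> simp_all [List.set_getElem_self] <;> omega

lemma chunk_eq (c : Char) (isLast : Bool) (v0 v1 v2 v3 v4 v5 v6 v7 v8 : Int) :
    markerA isLast ((List.range 8).foldl (stepA (bits8 c)) [v0, v1, v2, v3, v4, v5, v6, v7, v8])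
      = ([v0, v1, v2, v3, v4, v5, v6, v7, v8].zip (char_bits c ++ [if isLast then 1 else 0])).map
          (fun vb => adjust vb.1 vb.2) := by
  obtain ⟨b0, b1, b2, b3, b4, b5, b6, b7, hb⟩ :
      ∃ b0 b1 b2 b3 b4 b5 b6 b7, char_bits c = [b0, b1, b2, b3, b4, b5, b6, b7] := by
    match h : char_bits c, char_bits_len c with
    | [b0, b1, b2, b3, b4, b5, b6, b7], _ => exact ⟨_, _, _, _, _, _, _, _, rfl⟩
  simp only [List.range_succ, List.range_zero, List.nil_append, List.foldl_append,
    List.foldl_cons, List.foldl_nil]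
  rw [stepA_eq c _ 0 (by simp) (by omega)]
  rw [stepA_eq c _ 1 (by simp) (by omega)]
  rw [stepA_eq c _ 2 (by simp) (by omega)]
  rw [stepA_eq c _ 3 (by simp) (by omega)]
  rw [stepA_eq c _ 4 (by simp) (by omega)]
  rw [stepA_eq c _ 5 (by simp) (by omega)]
  rw [stepA_eq c _ 6 (by simp) (by omega)]
  rw [stepA_eq c _ 7 (by simp) (by omega)]
  rw [markerA_eq _ _ (by simp)]
  simp [hb]

lemma get_byte_list_eq (data : String) : get_byte_list data = data.toList.map bits8 := by
  simp only [get_byte_list]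
  induction data.toList using List.reverseRecOn with
  | nil => simp
  | append_singleton xs x ihx => simp [ihx]

-- raw foldl bitstream = flatMap
lemma raw_bits_eq (chars : List Char) :
    chars.foldl (fun acc c => acc ++ char_bits c ++ [0]) []
      = chars.flatMap (fun c => char_bits c ++ [(0 : Int)]) := by
  suffices h : ∀ acc, chars.foldl (fun acc c => acc ++ char_bits c ++ [0]) acc
      = acc ++ chars.flatMap (fun c => char_bits c ++ [(0 : Int)]) by
    simpa using h []
  induction chars with
  | nil => simp
  | cons c rest ih => intro acc; simp [List.foldl_cons, List.flatMap]

-- patching the last bit of the raw stream yields the per-char marker form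
lemma set_last_eq (chars : List Char) (h : chars ≠ []) :
    (chars.flatMap (fun c => char_bits c ++ [(0 : Int)])).set
        ((chars.flatMap (fun c => char_bits c ++ [(0 : Int)])).length - 1) 1
      = bitsM chars := by
  induction chars with
  | nil => simp at h
  | cons c rest ih =>
    by_cases hr : rest = []
    · subst hr
      obtain ⟨b0, b1, b2, b3, b4, b5, b6, b7, hb⟩ :
          ∃ b0 b1 b2 b3 b4 b5 b6 b7, char_bits c = [b0, b1, b2, b3, b4, b5, b6, b7] := by
        match hh : char_bits c, char_bits_len c with
        | [b0, b1, b2, b3, b4, b5, b6, b7], _ => exact ⟨_, _, _, _, _, _, _, _, rfl⟩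
      simp [bitsM, hb]
    · have hlen : 0 < (rest.flatMap (fun c => char_bits c ++ [(0 : Int)])).length := by
        rcases rest with _ | ⟨d, ds⟩
        · exact absurd rfl hr
        · simp [List.flatMap_cons, char_bits_len]
      rw [List.flatMap_cons]
      have hL : ((char_bits c ++ [(0 : Int)]) ++ rest.flatMap (fun c => char_bits c ++ [(0 : Int)])).length - 1
          = (char_bits c ++ [(0 : Int)]).length +
            ((rest.flatMap (fun c => char_bits c ++ [(0 : Int)])).length - 1) := by
        simp only [List.length_append, char_bits_len, List.length_cons, List.length_nil]
        omega
      rw [hL, List.set_append_right _ _ (by omega)]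
      simp only [Nat.add_sub_cancel_left]
      rw [ih hr]
      simp [bitsM, hr]

lemma build_bits_eq (chars : List Char) : build_bits chars = bitsM chars := by
  unfold build_bits
  rw [raw_bits_eq]
  by_cases h : chars = []
  · subst h; simp [bitsM]
  · have : chars.flatMap (fun c => char_bits c ++ [(0 : Int)]) ≠ [] := by
      cases chars with
      | nil => simp at h
      | cons c rest => simp [List.flatMap_cons]
    simp only [List.isEmpty_iff, this]
    exact set_last_eq chars h

lemma goA_eq (chars : List Char) (pixrest : List (Int × Int × Int))
    (hlen : 3 * chars.length ≤ pixrest.length) :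
    goA (chars.map bits8) pixrest
      = toTriples (((flatten3 (pixrest.take (3 * chars.length))).zip (bitsM chars)).map
          (fun vb => adjust vb.1 vb.2)) := by
  induction chars generalizing pixrest with
  | nil => simp [goA, flatten3, toTriples]
  | cons c rest ih =>
    match pixrest, hlen with
    | (a1, a2, a3) :: (b1, b2, b3) :: (c1, c2, c3) :: restp, hlen =>
      have hlen' : 3 * rest.length ≤ restp.length := by
        simp [List.length_cons] at hlen ⊢; omega
      have htake : 3 * (c :: rest).length = 3 * rest.length + 3 := by
        simp [List.length_cons]; ring
      simp only [List.map_cons, goA]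
      rw [show (List.map bits8 rest).isEmpty = rest.isEmpty from by cases rest <;> rfl]
      rw [chunk_eq c rest.isEmpty, htake]
      obtain ⟨b0, b1', b2', b3', b4, b5, b6, b7, hb⟩ :
          ∃ b0 b1 b2 b3 b4 b5 b6 b7, char_bits c = [b0, b1, b2, b3, b4, b5, b6, b7] := by
        match hh : char_bits c, char_bits_len c with
        | [b0, b1, b2, b3, b4, b5, b6, b7], _ => exact ⟨_, _, _, _, _, _, _, _, rfl⟩
      rw [ih restp hlen']
      simp [hb, flatten3, bitsM, toTriples, List.flatMap_cons]

-- ===== VERDICT (by name: the statement is the Claim_ definition above) =====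
theorem modify_pixels_spec : Claim_equal_modify_pixels := by
  intro pix data _ hpre
  unfold Spec_modify_pixels modify_pixels modify_pixels_alt
  rw [get_byte_list_eq, build_bits_eq, gather_eq pix _ hpre]
  exact goA_eq data.toList pix hpre
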